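-- pv_equiv track=rewrite | github.com/virtualramblas/gromacs_smolagent | gromacsagent/gmx_validation.py | validate_gromacs_sequence
-- ===== SOURCE A (Python) =====
-- def validate_gromacs_sequence(command_list):
--     """
--     Validates if a list of GROMACS commands follows a specific sequence.
--
--     Args:
--         command_list (list): A list of strings, where each string is a GROMACS command.
--
--     Returns:
--         tuple: (bool, str) - True if valid, False otherwise, and a suggestion/feedback message.
--     """
--     required_steps = [
--         {"name": "Generate a GROMACS topology", "keywords": ["pdb2gmx", "topology", "forcefield"]},
--         {"name": "Edit the configuration", "keywords": ["editconf", "box", "periodic"]},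
--         {"name": "Solvate the protein", "keywords": ["solvate", "water"]},
--         {"name": "Generate mdrun input file", "keywords": ["grompp", "mdp"]},
--         {"name": "Run the simulation", "keywords": ["mdrun", "simulation"]}
--     ]
--
--     # Track the last identified step index
--     last_step_found_idx = -1
--     identified_steps_in_order = []
--
--     for i, step in enumerate(required_steps):
--         step_name = step["name"]
--         step_keywords = step["keywords"]
--
--         found_this_step = False
--         # Search for the step's keywords in the commands *after* the last found step
--         for j in range(last_step_found_idx + 1, len(command_list)):
--             command = command_list[j].lower()
--             if any(keyword in command for keyword in step_keywords):
--                 identified_steps_in_order.append(step_name)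
--                 last_step_found_idx = j
--                 found_this_step = True
--                 break
--
--         if not found_this_step:
--             # If a step is missing or out of order, it's invalid
--             missing_step_message = (
--                 f"Missing or out-of-order step: '{step_name}'. "
--                 f"Expected to find a command related to '{step_keywords[0]}' after '{identified_steps_in_order[-1]}' (if any previous step was found). "
--                 f"The current sequence found is: {identified_steps_in_order}"
--             )
--             return False, missing_step_message
--
--     if len(identified_steps_in_order) == len(required_steps):
--         return True, "All GROMACS steps are present and in the correct order."
--     else:
--         return False, "Not all required GROMACS steps were identified in the correct sequence."
-- ===== SOURCE B (Python) =====
-- def validate_gromacs_sequence(command_list):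
--     required_steps = [
--         {"name": "Generate a GROMACS topology", "keywords": ["pdb2gmx", "topology", "forcefield"]},
--         {"name": "Edit the configuration", "keywords": ["editconf", "box", "periodic"]},
--         {"name": "Solvate the protein", "keywords": ["solvate", "water"]},
--         {"name": "Generate mdrun input file", "keywords": ["grompp", "mdp"]},
--         {"name": "Run the simulation", "keywords": ["mdrun", "simulation"]}
--     ]
--     cursor = 0
--     identified_steps_in_order = []
--     for command in command_list:
--         if cursor < len(required_steps):
--             cmd = command.lower()
--             if any(keyword in cmd for keyword in required_steps[cursor]["keywords"]):
--                 identified_steps_in_order.append(required_steps[cursor]["name"])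
--                 cursor += 1
--     if cursor < len(required_steps):
--         step = required_steps[cursor]
--         missing_step_message = (
--             f"Missing or out-of-order step: '{step['name']}'. "
--             f"Expected to find a command related to '{step['keywords'][0]}' after '{identified_steps_in_order[-1]}' (if any previous step was found). "
--             f"The current sequence found is: {identified_steps_in_order}"
--         )
--         return False, missing_step_message
--     return True, "All GROMACS steps are present and in the correct order."
-- ===== Notes on version B (the rewrite author's own statement) =====
-- stated objective: simpler
-- what changed: A restarts a fresh inner scan over command_list (from after the last hit) for each of the five required steps; B makes a single left-to-right pass over command_list with a cursor into required_steps that advances on each match, then reports the step the cursor is stuck on.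
import Mathlib
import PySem

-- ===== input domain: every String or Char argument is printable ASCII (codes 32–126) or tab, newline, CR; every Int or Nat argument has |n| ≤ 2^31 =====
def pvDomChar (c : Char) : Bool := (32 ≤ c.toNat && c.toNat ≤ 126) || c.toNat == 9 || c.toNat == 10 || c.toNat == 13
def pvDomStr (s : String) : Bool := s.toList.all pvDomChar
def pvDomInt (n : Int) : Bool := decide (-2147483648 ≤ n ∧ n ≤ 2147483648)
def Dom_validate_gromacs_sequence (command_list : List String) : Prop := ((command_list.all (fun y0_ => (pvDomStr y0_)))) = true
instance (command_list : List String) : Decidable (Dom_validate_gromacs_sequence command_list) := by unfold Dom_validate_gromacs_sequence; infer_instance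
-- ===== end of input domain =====

-- B replaces A's per-step restarted inner scans by one single pass over command_list with a
-- cursor into the required-step table (objective: simpler). Pre_ excludes exactly the inputs on
-- which the Python A raises IndexError (no command matches the first step's keywords; B raises there too).

-- shared data and small helpers (both Python sources contain the same literals / idioms)
def reqSteps : List (String × List String) :=
  [("Generate a GROMACS topology", ["pdb2gmx", "topology", "forcefield"]),
   ("Edit the configuration", ["editconf", "box", "periodic"]),
   ("Solvate the protein", ["solvate", "water"]),
   ("Generate mdrun input file", ["grompp", "mdp"]),
   ("Run the simulation", ["mdrun", "simulation"])]

-- any(keyword in command for keyword in kws)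
def kwHit (kws : List String) (cmd : String) : Bool := kws.any (fun k => PySem.Str.isIn k cmd)

-- Python's str(list-of-str) for the step names occurring here (no quotes inside the names)
def pyReprStrList (l : List String) : String :=
  "[" ++ String.intercalate ", " (l.map (fun s => "'" ++ s ++ "'")) ++ "]"

def okMsg : String := "All GROMACS steps are present and in the correct order."

-- the missing-step f-string; identified[-1] raises IndexError in Python when the list is empty —
-- those inputs are excluded by Pre_ (both Pythons raise there), so the .getD "" default is never observed
def missingMsg (name : String) (kws : List String) (ident : List String) : String :=
  "Missing or out-of-order step: '" ++ name ++ "'. Expected to find a command related to '"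
    ++ kws.headD "" ++ "' after '" ++ (PySem.List.pyGet? ident (-1)).getD ""
    ++ "' (if any previous step was found). The current sequence found is: " ++ pyReprStrList ident

-- ===== PORT A =====
-- inner loop: for j in range(last+1, len(command_list)): if any kw in command_list[j].lower(): break
def aFind (cmds : List String) (kws : List String) : List Int → Option Int
  | [] => none
  | j :: js =>
      if kwHit kws (PySem.Str.lower (PySem.List.pyGetD cmds j "")) then some j else aFind cmds kws js

-- outer loop over required_steps with state (last_step_found_idx, identified_steps_in_order)
def aOuter (cmds : List String) : List (String × List String) → Int → List String → Bool × String
  | [], _, ident =>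
      if ident.length == reqSteps.length then (true, okMsg)
      else (false, "Not all required GROMACS steps were identified in the correct sequence.")
  | (name, kws) :: rest, last, ident =>
      match aFind cmds kws (PySem.List.pyRange (last + 1) cmds.length 1) with
      | some j => aOuter cmds rest j (ident ++ [name])
      | none => (false, missingMsg name kws ident)

def validate_gromacs_sequence (command_list : List String) : Bool × String :=
  aOuter command_list reqSteps (-1) []

-- ===== PORT B =====
-- one fold over command_list; state = (cursor into reqSteps, identified_steps_in_order)
def bStep (st : Nat × List String) (command : String) : Nat × List String :=
  match reqSteps[st.1]? with
  | some (name, kws) =>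
      if kwHit kws (PySem.Str.lower command) then (st.1 + 1, st.2 ++ [name]) else st
  | none => st

def validate_gromacs_sequence_alt (command_list : List String) : Bool × String :=
  let st := command_list.foldl bStep (0, [])
  match reqSteps[st.1]? with
  | some (name, kws) => (false, missingMsg name kws st.2)
  | none => (true, okMsg)

-- ===== PRECONDITION & SPEC =====
-- Pre_ excludes exactly the inputs where Python A raises IndexError (identified_steps_in_order[-1]
-- with an empty list): no command contains a keyword of the first required step. B raises there too.
def Pre_validate_gromacs_sequence (command_list : List String) : Prop :=
  command_list.any (fun c => kwHit ["pdb2gmx", "topology", "forcefield"] (PySem.Str.lower c)) = true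
instance (command_list : List String) : Decidable (Pre_validate_gromacs_sequence command_list) := by
  unfold Pre_validate_gromacs_sequence; infer_instance

def pvWitness_validate_gromacs_sequence : List String := ["pdb2gmx protein.pdb"]

def Spec_validate_gromacs_sequence (command_list : List String) (out : Bool × String) : Prop := out = validate_gromacs_sequence_alt command_list
instance (command_list : List String) (out : Bool × String) : Decidable (Spec_validate_gromacs_sequence command_list out) := by unfold Spec_validate_gromacs_sequence; infer_instance

-- ===== CLAIM (what is proved, stated in full; the proofs are below) =====
def Claim_equal_validate_gromacs_sequence : Prop := ∀ (command_list : List String), Dom_validate_gromacs_sequence command_list → Pre_validate_gromacs_sequence command_list → Spec_validate_gromacs_sequence command_list (validate_gromacs_sequence command_list)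

-- ===== LEMMAS AND PROOFS =====

-- proof-only view of A's search: drop the consumed prefix and return the commands after the first hit
def splitFirst (kws : List String) : List String → Option (List String)
  | [] => none
  | x :: t => if kwHit kws (PySem.Str.lower x) then some t else splitFirst kws t

-- proof-only view of A's outer loop, on command suffixes instead of indices
def aGo : List (String × List String) → List String → List String → Bool × String
  | [], _, ident =>
      if ident.length == reqSteps.length then (true, okMsg)
      else (false, "Not all required GROMACS steps were identified in the correct sequence.")
  | (name, kws) :: rest, cmds, ident =>
      match splitFirst kws cmds with
      | some after => aGo rest after (ident ++ [name])
      | none => (false, missingMsg name kws ident)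

lemma aFind_range (cmds kws : List String) :
    ∀ (l : List String) (a : Int), 0 ≤ a → cmds.drop a.toNat = l →
      (match aFind cmds kws (PySem.List.pyRange a cmds.length 1) with
       | none => splitFirst kws l = none
       | some j => 0 ≤ j ∧ splitFirst kws l = some (cmds.drop (j + 1).toNat)) := by
  intro l
  induction l with
  | nil =>
      intro a ha hd
      have hlen : cmds.length ≤ a.toNat := by
        by_contra h
        have := List.drop_eq_nil_iff.mp hd
        omega
      have : PySem.List.pyRange a cmds.length 1 = [] := by
        apply PySem.List.pyRange_one_eq_nil; omega
      simp [this, aFind, splitFirst]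
  | cons x t ih =>
      intro a ha hd
      have hlt : a.toNat < cmds.length := by
        by_contra h
        have : cmds.drop a.toNat = [] := List.drop_eq_nil_iff.mpr (by omega)
        simp [this] at hd
      have hget : cmds[a.toNat]? = some x := by
        have h0 : (cmds.drop a.toNat)[0]? = some x := by simp [hd]
        rw [List.getElem?_drop] at h0; simpa using h0
      have hx : PySem.List.pyGetD cmds a "" = x := by
        rw [PySem.List.pyGetD_eq_getElem cmds "" ha (by omega)]
        exact (List.getElem?_eq_some_iff.mp hget).2
      have htail : cmds.drop (a.toNat + 1) = t := by
        rw [← List.drop_drop]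
        simp [hd]
      have hsucc : (a + 1).toNat = a.toNat + 1 := by omega
      rw [PySem.List.pyRange_one_cons (by omega)]
      simp only [aFind, hx]
      by_cases hhit : kwHit kws (PySem.Str.lower x) = true
      · simp only [hhit]
        refine ⟨ha, ?_⟩
        simp only [splitFirst, hhit]
        rw [hsucc, htail]
        simp
      · simp only [hhit]
        have := ih (a + 1) (by omega) (by rw [hsucc]; exact htail)
        simp only [splitFirst, hhit] at *
        simpa using this


lemma aOuter_eq_aGo (cmds : List String) :
    ∀ (ss : List (String × List String)) (a : Int) (ident : List String), 0 ≤ a →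
      aOuter cmds ss (a - 1) ident = aGo ss (cmds.drop a.toNat) ident := by
  intro ss
  induction ss with
  | nil => intro a ident _; simp [aOuter, aGo]
  | cons s rest ih =>
      intro a ident ha
      obtain ⟨name, kws⟩ := s
      have h := aFind_range cmds kws (cmds.drop a.toNat) a ha rfl
      simp only [aOuter, aGo]
      have hrange : a - 1 + 1 = a := by omega
      rw [hrange]
      cases hfind : aFind cmds kws (PySem.List.pyRange a cmds.length 1) with
      | none => rw [hfind] at h; simp [h]
      | some j =>
          rw [hfind] at h
          obtain ⟨hj, hsplit⟩ := h
          rw [hsplit]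
          have := ih (j + 1) (ident ++ [name]) (by omega)
          simpa using this

-- B's final answer from a fold state
def bFinish (st : Nat × List String) : Bool × String :=
  match reqSteps[st.1]? with
  | some (name, kws) => (false, missingMsg name kws st.2)
  | none => (true, okMsg)

lemma aGo_eq_fold :
    ∀ (l : List String) (c : Nat) (ident : List String), ident.length = c → c ≤ 5 →
      aGo (reqSteps.drop c) l ident = bFinish (l.foldl bStep (c, ident)) := by
  intro l
  induction l with
  | nil =>
      intro c ident hlen hc
      interval_cases c <;> simp_all [aGo, bFinish, splitFirst, reqSteps]
  | cons x t ih =>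
      intro c ident hlen hc
      by_cases h5 : c = 5
      · subst h5
        have hstep : bStep (5, ident) x = (5, ident) := by simp [bStep, reqSteps]
        simp only [List.foldl_cons, hstep]
        rw [← ih 5 ident hlen (by omega)]
        simp [aGo, reqSteps, hlen]
      · -- c < 5 : the cursor points at a real step
        have hc5 : c < 5 := by omega
        obtain ⟨name, kws, hget, hdrop⟩ :
            ∃ name kws, reqSteps[c]? = some (name, kws) ∧
              reqSteps.drop c = (name, kws) :: reqSteps.drop (c + 1) := by
          interval_cases c <;> exact ⟨_, _, rfl, rfl⟩
        by_cases hhit : kwHit kws (PySem.Str.lower x) = true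
        · have hstep : bStep (c, ident) x = (c + 1, ident ++ [name]) := by
            simp [bStep, hget, hhit]
          simp only [List.foldl_cons, hstep, hdrop, aGo, splitFirst, hhit]
          exact ih (c + 1) (ident ++ [name]) (by simp [hlen]) (by omega)
        · have hstep : bStep (c, ident) x = (c, ident) := by
            simp [bStep, hget, hhit]
          simp only [List.foldl_cons, hstep, hdrop, aGo, splitFirst, hhit]
          have := ih c ident hlen hc
          rw [hdrop] at this
          simpa [aGo] using this

-- ===== VERDICT (by name: the statement is the Claim_ definition above) =====
theorem validate_gromacs_sequence_spec : Claim_equal_validate_gromacs_sequence := by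
  intro command_list _ _
  show validate_gromacs_sequence command_list = validate_gromacs_sequence_alt command_list
  unfold validate_gromacs_sequence validate_gromacs_sequence_alt
  have h0 : (-1 : Int) = 0 - 1 := by norm_num
  rw [h0, aOuter_eq_aGo command_list reqSteps 0 [] le_rfl]
  simpa [bFinish] using aGo_eq_fold command_list 0 [] rfl (by omega)
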